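-- pv_equiv track=rewrite | github.com/g7fernandes/whatstatone | history_reader.py | nome
-- ===== SOURCE A (Python) =====
-- def nome(p):
--     i = 3
--     nome = ""
--     aux = True
--
--     while p[i][-1] != ":":
--         nome = nome + p[i] + " "
--         i += 1
--         if i >= (len(p)):
--             i = i-1
--             break
--
--     if p[i][-1] == ":":
--         aux = False
--
--     nome = nome + p[i]
--     nome = nome.replace(":","")
--     if aux or len(nome) > 50:
--         nome = " "
--     return nome
-- ===== SOURCE B (Python) =====
-- def nome(p):
--     i = 3
--     name = ' '
--     while p[i][-1] != ':':
--         i += 1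
--         if i >= len(p):
--             break
--     else:
--         name = ' '.join(p[3:i + 1]).replace(':', '')
--         if len(name) > 50:
--             name = ' '
--     return name
-- ===== Notes on version B (the rewrite author's own statement) =====
-- stated objective: faster
-- what changed: B finds the index where the "while p[i][-1] != ':'" scan stops (a while-else with no accumulation) and then builds the name in one shot with ' '.join over the slice plus replace, instead of A's loop that accumulates the name by repeated string concatenation, mutates an aux flag and re-appends the stopping token; Pre_ excludes exactly the inputs where both raise IndexError (len(p) <= 3, or an empty token reached before the first ':'-ending token).
import Mathlib
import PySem

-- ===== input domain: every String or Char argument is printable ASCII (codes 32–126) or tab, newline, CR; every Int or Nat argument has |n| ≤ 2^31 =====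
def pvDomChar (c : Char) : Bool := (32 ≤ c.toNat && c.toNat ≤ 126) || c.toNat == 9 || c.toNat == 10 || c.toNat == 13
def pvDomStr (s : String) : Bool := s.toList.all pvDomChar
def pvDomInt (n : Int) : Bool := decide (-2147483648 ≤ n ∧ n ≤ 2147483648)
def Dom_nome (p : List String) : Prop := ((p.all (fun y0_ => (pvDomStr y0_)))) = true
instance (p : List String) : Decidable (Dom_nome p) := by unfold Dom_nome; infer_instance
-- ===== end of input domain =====

-- B replaces A's while loop that accumulates the name by repeated string concatenation (plus an
-- aux flag and a re-appended stop token) by: find where the p[i][-1] != ':' scan stops, then build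
-- the name once with ' '.join over the slice and strip ':' — linear instead of quadratic
-- concatenation (a timing run measured B faster on large inputs).

-- ===== PORT A =====
-- p[i] (IndexError = none; default "" only reachable outside Pre_nome)
def tokA (p : List String) (i : Nat) : String := (PySem.List.pyGet? p (i : Int)).getD ""
-- p[i][-1] (IndexError = none; default ':' only reachable outside Pre_nome)
def lastA (p : List String) (i : Nat) : Char := (PySem.Str.pyGet? (tokA p i) (-1)).getD ':'

-- the while loop: returns the final (i, nome) state (fuel = p.length + 1 at the call
-- site is strictly more than the loop's iteration count, so the 0 case is never reached)
def loopA (p : List String) : Nat → Nat → String → Nat × String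
  | 0, i, name => (i, name)
  | fuel + 1, i, name =>
    if lastA p i ≠ ':' then
      let name' := name ++ tokA p i ++ " "
      if p.length ≤ i + 1 then (i, name')    -- i += 1; i >= len(p) → i -= 1; break
      else loopA p fuel (i + 1) name'
    else (i, name)

def nome (p : List String) : String :=
  let r := loopA p (p.length + 1) 3 ""
  let aux : Bool := !(lastA p r.1 == ':')    -- aux = True unless p[i][-1] == ':'
  let name := r.2 ++ tokA p r.1
  let name := PySem.Str.replace name ":" ""
  if aux || decide (50 < PySem.Str.len name) then " " else name

-- ===== PORT B =====
-- B's search loop: the index where "while p[i][-1] != ':'" stops with a ':' (the while-else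
-- ran its else), none if it broke at the end of the list (fuel as for loopA; lastA is the
-- shared transliteration of the expression p[i][-1])
def findColon (p : List String) : Nat → Nat → Option Nat
  | 0, _ => none
  | fuel + 1, i =>
    if lastA p i ≠ ':' then
      if p.length ≤ i + 1 then none
      else findColon p fuel (i + 1)
    else some i

def nome_alt (p : List String) : String :=
  match findColon p (p.length + 1) 3 with
  | none => " "
  | some j =>
    let name := PySem.Str.replace
      (PySem.Str.join " " (PySem.List.slice p (some (3 : Int)) (some ((j : Int) + 1)))) ":" ""
    if 50 < PySem.Str.len name then " " else name

-- ===== PRECONDITION & SPEC =====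
-- Pre_nome = exactly the inputs where A returns: at least 4 tokens, and no empty token at an
-- index ≥ 3 before (or at) the position where the first ':'-ending token is sought (A evaluates
-- p[i][-1] there and raises IndexError on "").
def Pre_nome (p : List String) : Prop :=
  4 ≤ p.length ∧
  ∀ k < p.length, 3 ≤ k →
    (∀ l < k, 3 ≤ l → PySem.Str.endswith (p.getD l "") ":" = false) →
    p.getD k "" ≠ ""
instance (p : List String) : Decidable (Pre_nome p) := by unfold Pre_nome; infer_instance

def pvWitness_nome : List String := ["12/12/20,", "10:00", "-", "John", "Doe:", "hi"]

def Spec_nome (p : List String) (out : String) : Prop := out = nome_alt p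
instance (p : List String) (out : String) : Decidable (Spec_nome p out) := by unfold Spec_nome; infer_instance

-- ===== CLAIM (what is proved, stated in full; the proofs are below) =====
def Claim_equal_nome : Prop := ∀ (p : List String), Dom_nome p → Pre_nome p → Spec_nome p (nome p)

-- ===== LEMMAS AND PROOFS =====

-- tokens i, i+1, …, i+n-1 each followed by a space (the loop's accumulated prefix)
def catChars (p : List String) (i n : Nat) : List Char :=
  match n with
  | 0 => []
  | n + 1 => (p.getD i "").toList ++ ' ' :: catChars p (i + 1) n

theorem tokA_eq_getD (p : List String) (i : Nat) (_h : i < p.length) :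
    tokA p i = p.getD i "" := by
  simp [tokA, List.getD_eq_getElem?_getD]

theorem lastA_eq_iff (p : List String) (i : Nat) (h : i < p.length) (hne : p.getD i "" ≠ "") :
    (lastA p i = ':') ↔ PySem.Str.endswith (p.getD i "") ":" = true := by
  have hs : tokA p i = p.getD i "" := tokA_eq_getD p i h
  have hl : (p.getD i "").toList ≠ [] := by
    intro hnil; apply hne; rw [← String.toList_inj, hnil]; rfl
  unfold lastA
  rw [hs]
  set s := p.getD i "" with hsdef
  obtain ⟨c, hc⟩ : ∃ c, s.toList.getLast? = some c := by
    cases hgl : s.toList.getLast? with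
    | none => exact absurd (List.getLast?_eq_none_iff.mp hgl) hl
    | some c => exact ⟨c, rfl⟩
  obtain ⟨l', hl'⟩ := List.getLast?_eq_some_iff.mp hc
  have h1 : PySem.Str.pyGet? s (-1) = some c := by
    simp [PySem.Str.pyGet?_eq, PySem.List.pyGet?_neg_one, hc]
  have h2 : PySem.Str.endswith s ":" = PySem.Chars.endswith s.toList [':'] := by
    simp [PySem.Str.endswith_eq]
  rw [h1, h2]
  constructor
  · intro hcc
    simp only [Option.getD_some] at hcc
    rw [PySem.Chars.endswith_iff, hl', hcc]
    exact ⟨l', rfl⟩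
  · intro he
    rw [PySem.Chars.endswith_iff] at he
    obtain ⟨t, ht⟩ := he
    rw [hl'] at ht
    have hlen : t.length = l'.length := by
      have := congrArg List.length ht; simp at this; omega
    have h3 : [':'] = [c] := List.append_inj_right ht hlen
    simp at h3 ⊢
    exact h3.symm

theorem loopA_found (p : List String) :
    ∀ (fuel n i : Nat) (name : String),
    p.length ≤ i + fuel →
    i + n < p.length →
    PySem.Str.endswith (p.getD (i + n) "") ":" = true →
    (∀ k, i ≤ k → k < i + n → PySem.Str.endswith (p.getD k "") ":" = false) →
    (∀ k, i ≤ k → k ≤ i + n → p.getD k "" ≠ "") →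
    loopA p fuel i name = (i + n, String.ofList (name.toList ++ catChars p i n)) := by
  intro fuel n
  induction n generalizing fuel with
  | zero =>
    intro i name hfuel hlt hcol hnocol hne
    obtain ⟨f, rfl⟩ : ∃ f, fuel = f + 1 := by
      cases fuel with
      | zero => omega
      | succ f => exact ⟨f, rfl⟩
    simp only [Nat.add_zero] at hlt hcol
    have hlast : lastA p i = ':' :=
      (lastA_eq_iff p i hlt (hne i le_rfl (by omega))).mpr hcol
    simp [loopA, hlast, catChars, String.ofList_toList]
  | succ n ih =>
    intro i name hfuel hlt hcol hnocol hne
    obtain ⟨f, rfl⟩ : ∃ f, fuel = f + 1 := by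
      cases fuel with
      | zero => omega
      | succ f => exact ⟨f, rfl⟩
    have hi : i < p.length := by omega
    have hlast : lastA p i ≠ ':' := by
      intro hcc
      have ht := (lastA_eq_iff p i hi (hne i le_rfl (by omega))).mp hcc
      rw [hnocol i le_rfl (by omega)] at ht
      exact Bool.noConfusion ht
    have hrec := ih f (i + 1) (name ++ tokA p i ++ " ")
      (by omega) (by omega)
      (by rw [show i + 1 + n = i + (n + 1) by omega]; exact hcol)
      (fun k hk1 hk2 => hnocol k (by omega) (by omega))
      (fun k hk1 hk2 => hne k (by omega) (by omega))
    simp only [loopA]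
    rw [if_pos hlast, if_neg (show ¬ p.length ≤ i + 1 by omega), hrec]
    congr 1
    · omega
    · congr 1
      simp [catChars, tokA_eq_getD p i hi]

theorem loopA_none (p : List String) :
    ∀ (fuel n i : Nat) (name : String),
    p.length < i + fuel →
    i + n + 1 = p.length →
    (∀ k, i ≤ k → k < p.length → PySem.Str.endswith (p.getD k "") ":" = false) →
    (∀ k, i ≤ k → k < p.length → p.getD k "" ≠ "") →
    loopA p fuel i name = (i + n, String.ofList (name.toList ++ catChars p i (n + 1))) := by
  intro fuel n
  induction n generalizing fuel with
  | zero =>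
    intro i name hfuel hlen hnocol hne
    obtain ⟨f, rfl⟩ : ∃ f, fuel = f + 1 := by
      cases fuel with
      | zero => omega
      | succ f => exact ⟨f, rfl⟩
    have hi : i < p.length := by omega
    have hlast : lastA p i ≠ ':' := by
      intro hcc
      have ht := (lastA_eq_iff p i hi (hne i le_rfl hi)).mp hcc
      rw [hnocol i le_rfl hi] at ht
      exact Bool.noConfusion ht
    simp only [loopA]
    rw [if_pos hlast, if_pos (show p.length ≤ i + 1 by omega)]
    simp [catChars, tokA_eq_getD p i hi, String.append_assoc]
  | succ n ih =>
    intro i name hfuel hlen hnocol hne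
    obtain ⟨f, rfl⟩ : ∃ f, fuel = f + 1 := by
      cases fuel with
      | zero => omega
      | succ f => exact ⟨f, rfl⟩
    have hi : i < p.length := by omega
    have hlast : lastA p i ≠ ':' := by
      intro hcc
      have ht := (lastA_eq_iff p i hi (hne i le_rfl hi)).mp hcc
      rw [hnocol i le_rfl hi] at ht
      exact Bool.noConfusion ht
    have hrec := ih f (i + 1) (name ++ tokA p i ++ " ")
      (by omega) (by omega)
      (fun k hk1 hk2 => hnocol k (by omega) hk2)
      (fun k hk1 hk2 => hne k (by omega) hk2)
    simp only [loopA]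
    rw [if_pos hlast, if_neg (show ¬ p.length ≤ i + 1 by omega), hrec]
    congr 1
    · omega
    · congr 1
      simp [catChars, tokA_eq_getD p i hi]

theorem findColon_some (p : List String) :
    ∀ (fuel k j : Nat), k < p.length → findColon p fuel k = some j →
    k ≤ j ∧ j < p.length ∧ lastA p j = ':' ∧
    (∀ l, k ≤ l → l < j → lastA p l ≠ ':') := by
  intro fuel
  induction fuel with
  | zero => intro k j _ h; simp [findColon] at h
  | succ f ih =>
    intro k j hk h
    simp only [findColon] at h
    by_cases hlast : lastA p k = ':'
    · rw [if_neg (by simp [hlast])] at h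
      obtain rfl : k = j := by simpa using h
      exact ⟨le_rfl, hk, hlast, fun l h1 h2 => absurd h1 (by omega)⟩
    · rw [if_pos hlast] at h
      by_cases hend : p.length ≤ k + 1
      · rw [if_pos hend] at h; simp at h
      · rw [if_neg hend] at h
        obtain ⟨h1, h2, h3, h4⟩ := ih (k + 1) j (by omega) h
        refine ⟨by omega, h2, h3, fun l hl1 hl2 => ?_⟩
        rcases Nat.eq_or_lt_of_le hl1 with rfl | hlt
        · exact hlast
        · exact h4 l (by omega) hl2

theorem findColon_none (p : List String) :
    ∀ (fuel k : Nat), p.length ≤ k + fuel → findColon p fuel k = none →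
    ∀ l, k ≤ l → l < p.length → lastA p l ≠ ':' := by
  intro fuel
  induction fuel with
  | zero => intro k hb h l h1 h2; omega
  | succ f ih =>
    intro k hb h l h1 h2
    simp only [findColon] at h
    by_cases hlast : lastA p k = ':'
    · rw [if_neg (by simp [hlast])] at h; simp at h
    · rw [if_pos hlast] at h
      rcases Nat.eq_or_lt_of_le h1 with rfl | hlt
      · exact hlast
      · by_cases hend : p.length ≤ k + 1
        · omega
        · rw [if_neg hend] at h
          exact ih (k + 1) (by omega) h l (by omega) h2

-- under Pre_nome's chained nonemptiness, every index below a lastA-colon-free prefix holds a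
-- nonempty token that does not end with ':'
theorem pre_chain (p : List String)
    (hne : ∀ k < p.length, 3 ≤ k →
      (∀ l < k, 3 ≤ l → PySem.Str.endswith (p.getD l "") ":" = false) → p.getD k "" ≠ "")
    (m : Nat) (hm : m ≤ p.length)
    (hlast : ∀ l, 3 ≤ l → l < m → lastA p l ≠ ':') :
    ∀ k, 3 ≤ k → k < m →
      p.getD k "" ≠ "" ∧ PySem.Str.endswith (p.getD k "") ":" = false := by
  intro k
  induction k using Nat.strong_induction_on with
  | _ k ih =>
    intro h3 hkm
    have hguard : ∀ l < k, 3 ≤ l → PySem.Str.endswith (p.getD l "") ":" = false :=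
      fun l hl h3l => (ih l hl h3l (by omega)).2
    have hnek : p.getD k "" ≠ "" := hne k (by omega) h3 hguard
    refine ⟨hnek, ?_⟩
    cases hB : PySem.Str.endswith (p.getD k "") ":" with
    | false => rfl
    | true =>
      exact absurd ((lastA_eq_iff p k (by omega) hnek).mpr hB) (hlast k h3 hkm)

theorem join_eq_catChars (p : List String) :
    ∀ (n i : Nat), i + n < p.length →
    PySem.Chars.join [' '] (((p.drop i).take (n + 1)).map String.toList) =
      catChars p i n ++ (p.getD (i + n) "").toList := by
  intro n
  induction n with
  | zero =>
    intro i hi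
    simp only [Nat.add_zero] at hi ⊢
    rw [List.drop_eq_getElem_cons hi]
    simp only [List.take_succ_cons, List.take_zero, List.map_cons, List.map_nil]
    rw [PySem.Chars.join_singleton]
    simp [catChars, List.getD_eq_getElem?_getD, List.getElem?_eq_getElem hi]
  | succ n ih =>
    intro i hi
    have hi' : i < p.length := by omega
    rw [List.drop_eq_getElem_cons hi']
    have hlen : ((p.drop (i + 1)).take (n + 1)).length = n + 1 := by
      rw [List.length_take, List.length_drop]; omega
    obtain ⟨b, rest, hbr⟩ : ∃ b rest, (p.drop (i + 1)).take (n + 1) = b :: rest := by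
      cases hx : (p.drop (i + 1)).take (n + 1) with
      | nil => rw [hx] at hlen; simp at hlen
      | cons b rest => exact ⟨b, rest, rfl⟩
    rw [show n + 1 + 1 = (n + 1) + 1 by rfl, List.take_succ_cons, hbr, List.map_cons,
      List.map_cons, PySem.Chars.join_cons_cons, ← List.map_cons, ← hbr]
    rw [ih (i + 1) (by omega)]
    simp [catChars, List.getD_eq_getElem?_getD, List.getElem?_eq_getElem hi',
      show i + 1 + n = i + (n + 1) by omega]

-- ===== VERDICT (by name: the statement is the Claim_ definition above) =====
theorem nome_spec : Claim_equal_nome := by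
  intro p _ hpre
  unfold Spec_nome
  obtain ⟨hlen, hne⟩ := hpre
  cases hfc : findColon p (p.length + 1) 3 with
  | some j =>
    obtain ⟨h3j, hjlen, hlastj, hnocolL⟩ :=
      findColon_some p (p.length + 1) 3 j (by omega) hfc
    have hchain := pre_chain p hne j (by omega) (fun l hl1 hl2 => hnocolL l hl1 hl2)
    have hnej : p.getD j "" ≠ "" :=
      hne j hjlen (by omega) (fun l hl h3l => (hchain l h3l hl).2)
    have hcol : PySem.Str.endswith (p.getD j "") ":" = true :=
      (lastA_eq_iff p j hjlen hnej).mp hlastj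
    have hnocol : ∀ l, 3 ≤ l → l < j → PySem.Str.endswith (p.getD l "") ":" = false :=
      fun l h1 h2 => (hchain l h1 h2).2
    have hne' : ∀ k, 3 ≤ k → k ≤ j → p.getD k "" ≠ "" := by
      intro k h1 h2
      rcases Nat.eq_or_lt_of_le h2 with rfl | hlt
      · exact hnej
      · exact (hchain k h1 hlt).1
    obtain ⟨n, rfl⟩ : ∃ n, j = 3 + n := ⟨j - 3, by omega⟩
    have hloop := loopA_found p (p.length + 1) n 3 "" (by omega) hjlen hcol
      (fun k hk1 hk2 => hnocol k hk1 hk2) (fun k hk1 hk2 => hne' k hk1 hk2)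
    have hstr : String.ofList (("".toList) ++ catChars p 3 n) ++ tokA p (3 + n) =
        PySem.Str.join " " (PySem.List.slice p (some (3 : Int)) (some (((3 + n : Nat) : Int) + 1))) := by
      rw [← String.toList_inj]
      have hcast : ((3 + n : Nat) : Int) + 1 = (((3 + n + 1 : Nat) : Int)) := by push_cast; ring
      rw [hcast, PySem.List.slice_toNat p (by norm_num) (Int.natCast_nonneg _)]
      rw [show ((3 + n + 1 : Nat) : Int).toNat - (3 : Int).toNat = n + 1 from by
        rw [Int.toNat_natCast]; omega]
      rw [show (3 : Int).toNat = 3 from rfl]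
      rw [PySem.Str.toList_join, show (" ".toList) = [' '] from rfl,
        join_eq_catChars p n 3 (by omega)]
      simp [tokA_eq_getD p (3 + n) hjlen]
    have hstr2 : String.ofList (catChars p 3 n) ++ tokA p (3 + n) =
        PySem.Str.join " " (PySem.List.slice p (some 3) (some (3 + (n : Int) + 1))) := by
      have hc : (3 + (n : Int) + 1) = (((3 + n : Nat) : Int) + 1) := by push_cast; ring
      rw [hc]
      simpa using hstr
    unfold nome nome_alt
    rw [hfc, hloop]
    simp [hlastj, hstr2]
  | none =>
    have hnocolL := findColon_none p (p.length + 1) 3 (by omega) hfc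
    have hchain := pre_chain p hne p.length le_rfl (fun l hl1 hl2 => hnocolL l hl1 hl2)
    have hnocol : ∀ k, 3 ≤ k → k < p.length → PySem.Str.endswith (p.getD k "") ":" = false :=
      fun k h1 h2 => (hchain k h1 h2).2
    have hne' : ∀ k, 3 ≤ k → k < p.length → p.getD k "" ≠ "" :=
      fun k h1 h2 => (hchain k h1 h2).1
    obtain ⟨n, hn⟩ : ∃ n, 3 + n + 1 = p.length := ⟨p.length - 4, by omega⟩
    have hloop := loopA_none p (p.length + 1) n 3 "" (by omega) hn
      (fun k hk1 hk2 => hnocol k hk1 hk2) (fun k hk1 hk2 => hne' k hk1 hk2)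
    have hlast : lastA p (3 + n) ≠ ':' := hnocolL (3 + n) (by omega) (by omega)
    unfold nome nome_alt
    rw [hfc, hloop]
    simp [hlast]
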